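-- pv_equiv track=rewrite | github.com/ABRJrocks/Enigma-Language-Compiler-In-Python--Tokenizer--Parser--Semantic--Code-Gen--Output- | optimizer.py | remove_unused_labels
-- ===== SOURCE A (Python) =====
-- def remove_unused_labels(instructions):
--     optimized_instructions = []
--     used_labels = set()
--     for instruction in instructions:
--         if instruction.startswith("JMP") or instruction.startswith("IF"):
--             parts = instruction.split()
--             used_labels.add(parts[-1])
--     for instruction in instructions:
--         if not instruction.endswith(":") or instruction.split(":")[0] in used_labels:
--             optimized_instructions.append(instruction)
--     return optimized_instructions
-- ===== SOURCE B (Python) =====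
-- def remove_unused_labels(instructions):
--     optimized_instructions = []
--     for instruction in instructions:
--         if not instruction.endswith(":"):
--             optimized_instructions.append(instruction)
--         else:
--             name = instruction.split(":")[0]
--             if any(jump.split()[-1] == name
--                    for jump in instructions
--                    if jump.startswith("JMP") or jump.startswith("IF")):
--                 optimized_instructions.append(instruction)
--     return optimized_instructions
-- ===== Notes on version B (the rewrite author's own statement) =====
-- stated objective: alternative
-- what changed: B drops A's precomputed used-label set and index pass entirely; a single loop keeps every non-label line and, for each label definition, scans the instruction list for a JMP/IF line whose last whitespace token is the label's name.
import Mathlib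
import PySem

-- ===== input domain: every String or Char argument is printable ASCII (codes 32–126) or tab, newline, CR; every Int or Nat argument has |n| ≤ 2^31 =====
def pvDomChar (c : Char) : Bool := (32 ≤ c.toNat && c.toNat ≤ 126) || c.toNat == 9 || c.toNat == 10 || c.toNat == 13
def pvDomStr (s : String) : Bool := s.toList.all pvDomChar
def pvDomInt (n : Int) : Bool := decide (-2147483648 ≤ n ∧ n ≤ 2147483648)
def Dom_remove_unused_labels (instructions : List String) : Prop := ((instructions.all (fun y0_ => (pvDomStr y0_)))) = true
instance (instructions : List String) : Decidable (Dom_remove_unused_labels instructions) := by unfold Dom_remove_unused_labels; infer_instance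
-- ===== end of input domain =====

-- B replaces A's precomputed used-label set by a direct per-label scan of the jump
-- instructions (alternative decomposition: nested scans instead of index-then-filter).

-- shared token extraction: instruction.split(":")[0] (both Pythons contain this expression verbatim)
def pvLabelName? (instruction : String) : Option String :=
  (PySem.Str.split? instruction ":").bind (fun parts => parts[0]?)

-- ===== PORT A =====
-- first loop of A: build the set of jump targets (parts[-1] is never none in Python,
-- since the line starts with "JMP"/"IF"; the none branch is unreachable and keeps the set)
def pvUsedLabels (instructions : List String) : PySem.Set String :=
  instructions.foldl (fun used instruction =>
    if PySem.Str.startswith instruction "JMP" || PySem.Str.startswith instruction "IF" then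
      match PySem.List.pyGet? (PySem.Str.split₀ instruction) (-1) with
      | some t => PySem.Set.add used t
      | none => used
    else used) PySem.Set.empty

def remove_unused_labels (instructions : List String) : List String :=
  let used_labels := pvUsedLabels instructions
  instructions.foldl (fun optimized instruction =>
    if (!PySem.Str.endswith instruction ":"
        || (match pvLabelName? instruction with
            | some nm => PySem.Set.contains used_labels nm
            | none => false)) then
      optimized ++ [instruction]
    else optimized) []

-- ===== PORT B =====
def remove_unused_labels_alt (instructions : List String) : List String :=
  instructions.foldl (fun out instruction =>
    if !PySem.Str.endswith instruction ":" then out ++ [instruction]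
    else
      match pvLabelName? instruction with
      | some name =>
          -- any(jump.split()[-1] == name for jump in instructions if jump.startswith(...))
          if instructions.any (fun jump =>
              (PySem.Str.startswith jump "JMP" || PySem.Str.startswith jump "IF")
              && (PySem.List.pyGet? (PySem.Str.split₀ jump) (-1) == some name)) then
            out ++ [instruction]
          else out
      | none => out) []

-- ===== PRECONDITION & SPEC =====
def Spec_remove_unused_labels (instructions : List String) (out : List String) : Prop := out = remove_unused_labels_alt instructions
instance (instructions : List String) (out : List String) : Decidable (Spec_remove_unused_labels instructions out) := by unfold Spec_remove_unused_labels; infer_instance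

-- ===== CLAIM (what is proved, stated in full; the proofs are below) =====
def Claim_equal_remove_unused_labels : Prop := ∀ (instructions : List String), Dom_remove_unused_labels instructions → Spec_remove_unused_labels instructions (remove_unused_labels instructions)

-- ===== LEMMAS AND PROOFS =====

lemma mem_pvUsedLabels_aux (l : List String) (acc : PySem.Set String) (nm : String) :
    nm ∈ l.foldl (fun used instruction =>
      if PySem.Str.startswith instruction "JMP" || PySem.Str.startswith instruction "IF" then
        match PySem.List.pyGet? (PySem.Str.split₀ instruction) (-1) with
        | some t => PySem.Set.add used t
        | none => used
      else used) acc
    ↔ nm ∈ acc ∨ ∃ j ∈ l,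
        ((PySem.Str.startswith j "JMP" || PySem.Str.startswith j "IF") = true
          ∧ PySem.List.pyGet? (PySem.Str.split₀ j) (-1) = some nm) := by
  induction l generalizing acc with
  | nil => simp
  | cons x xs ih =>
    simp only [List.foldl_cons, ih, List.mem_cons]
    by_cases hg : (PySem.Str.startswith x "JMP" || PySem.Str.startswith x "IF") = true
    · simp only [hg, if_true]
      cases hget : PySem.List.pyGet? (PySem.Str.split₀ x) (-1) with
      | some t =>
        simp only [PySem.Set.mem_add]
        constructor
        · rintro (⟨h | h⟩ | ⟨j, hj, hg', he⟩)
          · exact Or.inl h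
          · exact Or.inr ⟨x, Or.inl rfl, hg, h ▸ hget⟩
          · exact Or.inr ⟨j, Or.inr hj, hg', he⟩
        · rintro (h | ⟨j, (rfl | hj), hg', he⟩)
          · exact Or.inl (Or.inl h)
          · rw [hget] at he; exact Or.inl (Or.inr (Option.some.inj he).symm)
          · exact Or.inr ⟨j, hj, hg', he⟩
      | none =>
        constructor
        · rintro (h | ⟨j, hj, hg', he⟩)
          · exact Or.inl h
          · exact Or.inr ⟨j, Or.inr hj, hg', he⟩
        · rintro (h | ⟨j, (rfl | hj), hg', he⟩)
          · exact Or.inl h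
          · rw [hget] at he; cases he
          · exact Or.inr ⟨j, hj, hg', he⟩
    · simp only [hg]
      constructor
      · rintro (h | ⟨j, hj, hg', he⟩)
        · exact Or.inl h
        · exact Or.inr ⟨j, Or.inr hj, hg', he⟩
      · rintro (h | ⟨j, (rfl | hj), hg', he⟩)
        · exact Or.inl h
        · exact absurd hg' hg
        · exact Or.inr ⟨j, hj, hg', he⟩

lemma contains_pvUsedLabels (l : List String) (nm : String) :
    PySem.Set.contains (pvUsedLabels l) nm
      = l.any (fun jump =>
          (PySem.Str.startswith jump "JMP" || PySem.Str.startswith jump "IF")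
          && (PySem.List.pyGet? (PySem.Str.split₀ jump) (-1) == some nm)) := by
  rw [Bool.eq_iff_iff]
  simp only [PySem.Set.contains, List.contains_iff_mem, pvUsedLabels, List.any_eq_true,
    Bool.and_eq_true, beq_iff_eq, mem_pvUsedLabels_aux]
  simp [PySem.Set.empty]

theorem remove_unused_labels_spec : Claim_equal_remove_unused_labels := by
  intro instructions _
  unfold Spec_remove_unused_labels remove_unused_labels remove_unused_labels_alt
  apply PySem.List.foldl_congr_mem
  intro acc x _
  cases he : PySem.Str.endswith x ":" with
  | false => simp
  | true =>
    simp only [Bool.not_true, Bool.false_or, Bool.false_eq_true, if_false]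
    cases hn : pvLabelName? x with
    | some nm => simp only [contains_pvUsedLabels]
    | none => simp only [Bool.false_eq_true, if_false]
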